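-- pv_equiv track=rewrite | github.com/N1K70/aiker | src/aiker/cli.py | _render_preview
-- ===== SOURCE A (Python) =====
-- def _render_preview(raw_output: str, max_chars: int = 2200, max_line_length: int = 140, max_lines: int = 36) -> str:
--     clipped = raw_output[:max_chars]
--     lines: list[str] = []
--     for line in clipped.splitlines():
--         if len(line) > max_line_length:
--             lines.append(f"{line[: max_line_length - 3]}...")
--         else:
--             lines.append(line)
--         if len(lines) >= max_lines:
--             lines.append("... output truncated ...")
--             break
--     return "\n".join(lines)
-- ===== SOURCE B (Python) =====
-- def _render_preview(raw_output: str, max_chars: int = 2200, max_line_length: int = 140, max_lines: int = 36) -> str: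
--     def shorten(line: str) -> str:
--         return line if len(line) <= max_line_length else line[: max_line_length - 3] + "..."
--
--     def render(lines: list[str], budget: int) -> str:
--         if not lines:
--             return ""
--         head = shorten(lines[0])
--         if budget <= 1:
--             return head + "\n... output truncated ..."
--         if len(lines) == 1:
--             return head
--         return head + "\n" + render(lines[1:], budget - 1)
--
--     return render(raw_output[:max_chars].splitlines(), max_lines)
-- ===== Notes on version B (the rewrite author's own statement) =====
-- stated objective: alternative
-- what changed: Replaces A's imperative loop that accumulates a list of lines (with break and a final '\n'.join) by a recursive descent over the line list with a countdown budget that builds the joined output string directly, with no intermediate list, no length test of an accumulator, and no join step.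
import Mathlib
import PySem

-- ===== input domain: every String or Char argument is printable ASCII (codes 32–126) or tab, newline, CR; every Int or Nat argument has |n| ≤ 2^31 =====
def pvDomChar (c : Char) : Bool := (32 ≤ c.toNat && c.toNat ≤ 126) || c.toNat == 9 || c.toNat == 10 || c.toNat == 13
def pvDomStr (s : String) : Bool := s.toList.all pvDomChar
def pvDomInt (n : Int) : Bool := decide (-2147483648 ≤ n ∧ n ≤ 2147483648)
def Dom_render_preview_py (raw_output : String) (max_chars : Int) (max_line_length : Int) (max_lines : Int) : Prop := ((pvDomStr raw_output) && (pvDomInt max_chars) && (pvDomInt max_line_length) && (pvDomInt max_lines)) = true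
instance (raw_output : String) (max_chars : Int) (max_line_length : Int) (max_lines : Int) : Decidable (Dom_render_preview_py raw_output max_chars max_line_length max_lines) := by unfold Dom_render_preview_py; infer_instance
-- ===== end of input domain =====

-- B replaces A's list-accumulating loop + break + join by a recursive descent with a countdown budget that builds the joined string directly (alternative decomposition, same cost).


def pvSentinel : List Char := "... output truncated ...".toList

-- ===== PORT A =====
-- A's for-loop with its early break: structural recursion over the remaining lines with the 'lines' accumulator
def pvLoopA (max_line_length max_lines : Int) : List (List Char) → List (List Char) → List (List Char)
  | [], acc => acc
  | line :: rest, acc =>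
    let acc' := acc ++ [if (line.length : Int) > max_line_length then
        PySem.List.slice line none (some (max_line_length - 3)) ++ "...".toList else line]
    if (acc'.length : Int) ≥ max_lines then acc' ++ [pvSentinel]
    else pvLoopA max_line_length max_lines rest acc'

def render_preview_py (raw_output : String) (max_chars : Int) (max_line_length : Int) (max_lines : Int) : String :=
  -- clipped = raw_output[:max_chars]; loop over clipped.splitlines(); "\n".join(lines)
  String.ofList (PySem.Chars.join ['\n']
    (pvLoopA max_line_length max_lines
      (PySem.Chars.splitlines (PySem.List.slice raw_output.toList none (some max_chars))) []))

-- ===== PORT B =====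
-- B's 'shorten' helper
def pvShorten (max_line_length : Int) (line : List Char) : List Char :=
  if (line.length : Int) ≤ max_line_length then line
  else PySem.List.slice line none (some (max_line_length - 3)) ++ "...".toList

-- B's recursive 'render': builds the joined string directly, counting the budget down
def pvRender (max_line_length : Int) : List (List Char) → Int → List Char
  | [], _ => []
  | line :: rest, budget =>
    let head := pvShorten max_line_length line
    if budget ≤ 1 then head ++ '\n' :: pvSentinel
    else match rest with
      | [] => head
      | _ :: _ => head ++ '\n' :: pvRender max_line_length rest (budget - 1)

def render_preview_py_alt (raw_output : String) (max_chars : Int) (max_line_length : Int) (max_lines : Int) : String :=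
  String.ofList (pvRender max_line_length
    (PySem.Chars.splitlines (PySem.List.slice raw_output.toList none (some max_chars))) max_lines)

-- ===== PRECONDITION & SPEC =====
def Spec_render_preview_py (raw_output : String) (max_chars : Int) (max_line_length : Int) (max_lines : Int) (out : String) : Prop := out = render_preview_py_alt raw_output max_chars max_line_length max_lines
instance (raw_output : String) (max_chars : Int) (max_line_length : Int) (max_lines : Int) (out : String) : Decidable (Spec_render_preview_py raw_output max_chars max_line_length max_lines out) := by unfold Spec_render_preview_py; infer_instance

-- ===== CLAIM (what is proved, stated in full; the proofs are below) =====
def Claim_equal_render_preview_py : Prop := ∀ (raw_output : String) (max_chars : Int) (max_line_length : Int) (max_lines : Int), Dom_render_preview_py raw_output max_chars max_line_length max_lines → Spec_render_preview_py raw_output max_chars max_line_length max_lines (render_preview_py raw_output max_chars max_line_length max_lines)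

-- ===== LEMMAS AND PROOFS =====

-- common characterisation of both results, as a joined character list
def pvSpecL (max_line_length max_lines : Int) (lines : List (List Char)) : List Char :=
  if lines ≠ [] ∧ (lines.length : Int) ≥ max_lines then
    PySem.Chars.join ['\n'] ((lines.take (max max_lines 1).toNat).map (pvShorten max_line_length)) ++ '\n' :: pvSentinel
  else PySem.Chars.join ['\n'] (lines.map (pvShorten max_line_length))

-- A's inline truncation expression is B's shorten helper
theorem pvClip_eq_shorten (mll : Int) (l : List Char) :
    (if (l.length : Int) > mll then PySem.List.slice l none (some (mll - 3)) ++ "...".toList else l)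
      = pvShorten mll l := by
  unfold pvShorten; split_ifs with h1 h2 <;> first | rfl | omega

theorem join_append_last (xs : List (List Char)) (y : List Char) (h : xs ≠ []) :
    PySem.Chars.join ['\n'] (xs ++ [y]) = PySem.Chars.join ['\n'] xs ++ '\n' :: y := by
  induction xs with
  | nil => simp at h
  | cons a t ih =>
    cases t with
    | nil => simp [PySem.Chars.join_cons_cons, PySem.Chars.join_singleton]
    | cons b u =>
      simp only [List.cons_append, PySem.Chars.join_cons_cons] at ih ⊢
      simp [ih]

-- invariant of A's loop below the cap
theorem pvLoopA_eq (mll m : Int) (lines acc : List (List Char))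
    (h : (acc.length : Int) < m) :
    pvLoopA mll m lines acc =
      if (acc.length : Int) + lines.length ≥ m then
        acc ++ (lines.take (m - acc.length).toNat).map (pvShorten mll) ++ [pvSentinel]
      else acc ++ lines.map (pvShorten mll) := by
  induction lines generalizing acc with
  | nil => simp [pvLoopA]; omega
  | cons l rest ih =>
    simp only [pvLoopA, pvClip_eq_shorten]
    by_cases hstop : ((acc ++ [pvShorten mll l]).length : Int) ≥ m
    · simp only [hstop, if_pos]
      have hml : m = (acc.length : Int) + 1 := by simp at hstop; omega
      have hcond : (acc.length : Int) + ((l :: rest).length : Int) ≥ m := by simp; omega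
      rw [if_pos (by simpa using hcond)]
      have : (m - acc.length).toNat = 1 := by omega
      simp [this]
    · simp only [hstop, if_neg, not_false_iff]
      have hlen : ((acc ++ [pvShorten mll l]).length : Int) < m := by
        simp at hstop ⊢; omega
      rw [ih _ hlen]
      by_cases hc : (acc.length : Int) + ((l :: rest).length : Int) ≥ m
      · rw [if_pos (by simp at hc ⊢; omega), if_pos (by simpa using hc)]
        have htake : (m - acc.length).toNat = (m - (acc.length + 1)).toNat + 1 := by
          simp at hstop; omega
        simp [htake, List.take_succ_cons]
      · rw [if_neg (by simp at hc ⊢; omega), if_neg (by simpa using hc)]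
        simp

-- A's joined result is pvSpecL
theorem loopA_spec (mll m : Int) (lines : List (List Char)) :
    PySem.Chars.join ['\n'] (pvLoopA mll m lines []) = pvSpecL mll m lines := by
  unfold pvSpecL
  by_cases hm : (1 : Int) ≤ m
  · rw [pvLoopA_eq mll m lines [] (by simpa using lt_of_lt_of_le Int.zero_lt_one hm)]
    simp only [List.length_nil, Nat.cast_zero, zero_add, Int.sub_zero, List.nil_append]
    by_cases hge : ((lines.length : Int) ≥ m)
    · have hne : lines ≠ [] := by
        cases lines with
        | nil => simp at hge; omega
        | cons a t => simp
      rw [if_pos hge, if_pos ⟨hne, hge⟩, max_eq_left hm]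
      have htne : lines.take m.toNat ≠ [] := by
        rw [Ne, List.take_eq_nil_iff]
        push Not
        exact ⟨by omega, hne⟩
      rw [join_append_last _ _ (by simpa using htne)]
    · rw [if_neg hge, if_neg (by tauto)]
  · -- m ≤ 0: the cap fires after the very first line (if any)
    cases lines with
    | nil => simp [pvLoopA, PySem.Chars.join_nil]
    | cons l rest =>
      have h1 : (1 : Int) ≥ m := by omega
      simp only [pvLoopA, pvClip_eq_shorten, List.nil_append]
      rw [if_pos (by simpa using h1)]
      rw [if_pos ⟨by simp, by simp; omega⟩]
      have hmax : (max m 1).toNat = 1 := by omega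
      rw [hmax]
      simp only [List.take_succ_cons, List.take_zero, List.map_cons, List.map_nil,
        List.singleton_append]
      rw [PySem.Chars.join_cons_cons, PySem.Chars.join_singleton, PySem.Chars.join_singleton]
      simp

-- B's recursion computes pvSpecL
theorem render_spec (mll : Int) (lines : List (List Char)) (m : Int) :
    pvRender mll lines m = pvSpecL mll m lines := by
  induction lines generalizing m with
  | nil => simp [pvRender, pvSpecL, PySem.Chars.join_nil]
  | cons l rest ih =>
    simp only [pvRender]
    by_cases hb : m ≤ 1
    · rw [if_pos hb]
      unfold pvSpecL
      rw [if_pos ⟨by simp, by simp; omega⟩]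
      have : (max m 1).toNat = 1 := by omega
      simp [this, PySem.Chars.join_singleton]
    · rw [if_neg hb]
      cases rest with
      | nil =>
        unfold pvSpecL
        rw [if_neg (by simp; omega)]
        simp [PySem.Chars.join_singleton]
      | cons r u =>
        simp only [ih]
        unfold pvSpecL
        by_cases hge : (((l :: r :: u).length : ℕ) : Int) ≥ m
        · have hge' : (((r :: u).length : Nat) : Int) ≥ m - 1 := by simp at hge ⊢; omega
          rw [if_pos ⟨by simp, hge'⟩, if_pos ⟨by simp, hge⟩]
          have h1 : (max m 1).toNat = (max (m - 1) 1).toNat + 1 := by omega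
          rw [h1, List.take_succ_cons, List.map_cons]
          have htne : ((r :: u).take (max (m - 1) 1).toNat).map (pvShorten mll) ≠ [] := by
            rw [Ne, List.map_eq_nil_iff, List.take_eq_nil_iff]
            push Not
            exact ⟨by omega, by simp⟩
          cases hcase : ((r :: u).take (max (m - 1) 1).toNat).map (pvShorten mll) with
          | nil => exact absurd hcase htne
          | cons p q =>
            rw [PySem.Chars.join_cons_cons]
            simp
        · have hge' : ¬ ((((r :: u).length : Nat) : Int) ≥ m - 1) := by simp at hge ⊢; omega
          rw [if_neg (fun hcon => hge' hcon.2), if_neg (fun hcon => hge hcon.2)]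
          simp [PySem.Chars.join_cons_cons]

-- ===== VERDICT (by name: the statement is the Claim_ definition above) =====
theorem render_preview_py_spec : Claim_equal_render_preview_py := by
  intro raw_output max_chars max_line_length max_lines _
  unfold Spec_render_preview_py render_preview_py render_preview_py_alt
  rw [loopA_spec, render_spec]
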